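-- pv_equiv track=rewrite | github.com/gpernelle/cortex | notebooks/functions.py | getHist
-- ===== SOURCE A (Python) =====
-- def getHist(data, binsize):
--     binnb = 0
--     val = []
--     for ind, i in enumerate(data):
--         if (ind%binsize)==0:
--             if binnb > 0:
--                 val.append(accumulator)
--             accumulator = 0
--             binnb +=1
--         else:
--             accumulator+=i
--     return val
-- ===== SOURCE B (Python) =====
-- def getHist(data, binsize):
--     return [sum(data[i + 1:i + binsize]) for i in range(0, len(data) - binsize, binsize)]
-- ===== Notes on version B (the rewrite author's own statement) =====
-- stated objective: simpler
-- what changed: A streams through the data with a modulo boundary test and an accumulator/bin-counter; B is a one-line comprehension over bin-start offsets range(0, len(data)-binsize, binsize) that sums each bin's slice data[i+1:i+binsize] with the built-in sum (C-level slice+sum per bin instead of per-element interpreted bookkeeping).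
-- outside the precondition, e.g. on getHist([1, 2, 3, 4], -2): A returns [2], B returns []; on getHist([], 0): A returns [], B raises ValueError; on getHist([1], 0): A raises ZeroDivisionError, B raises ValueError
import Mathlib
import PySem

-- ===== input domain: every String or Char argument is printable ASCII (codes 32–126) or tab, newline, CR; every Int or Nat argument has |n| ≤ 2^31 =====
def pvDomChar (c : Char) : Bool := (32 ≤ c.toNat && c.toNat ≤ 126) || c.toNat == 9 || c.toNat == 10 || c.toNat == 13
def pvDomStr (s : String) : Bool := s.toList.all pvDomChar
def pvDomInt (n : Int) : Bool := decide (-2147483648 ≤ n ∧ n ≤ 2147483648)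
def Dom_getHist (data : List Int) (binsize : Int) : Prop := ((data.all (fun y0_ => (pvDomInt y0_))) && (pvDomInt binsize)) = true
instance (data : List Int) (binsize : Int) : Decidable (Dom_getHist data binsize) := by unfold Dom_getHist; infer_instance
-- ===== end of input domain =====

-- B replaces A's streaming modulo/accumulator loop by a comprehension over bin-start
-- offsets that sums each bin's slice (objective: simpler); equivalence is claimed on
-- binsize ≥ 1 (see Pre_getHist).

-- ===== PORT A =====
-- state = (binnb, val, accumulator), exactly A's loop variables; A's `accumulator`
-- is unassigned until the first iteration, but under Pre_ (binsize ≥ 1) the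
-- if-branch fires at ind = 0 and sets it before any read, so initialising it to 0
-- is unobservable.
def getHistGo (binsize : Int) : List Int → Int → Int × List Int × Int → Int × List Int × Int
  | [], _, st => st
  | i :: rest, ind, (binnb, val, acc) =>
      if PySem.Int.mod ind binsize = 0 then
        getHistGo binsize rest (ind + 1) (binnb + 1, (if binnb > 0 then val ++ [acc] else val), 0)
      else
        getHistGo binsize rest (ind + 1) (binnb, val, acc + i)

def getHist (data : List Int) (binsize : Int) : List Int :=
  (getHistGo binsize data 0 (0, [], 0)).2.1

-- ===== PORT B =====
def getHist_alt (data : List Int) (binsize : Int) : List Int :=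
  (PySem.List.pyRange 0 ((data.length : Int) - binsize) binsize).map
    (fun i => (PySem.List.slice data (some (i + 1)) (some (i + binsize))).sum)

-- ===== PRECONDITION & SPEC =====
-- Pre_ restricts to the natural domain binsize ≥ 1: for binsize = 0 A raises
-- ZeroDivisionError on non-empty data (on empty data it returns []), and for
-- negative binsize A's values are an accident of Python's modulo sign rule while
-- B's range is empty.
def Pre_getHist (data : List Int) (binsize : Int) : Prop := 1 ≤ binsize
instance (data : List Int) (binsize : Int) : Decidable (Pre_getHist data binsize) := by unfold Pre_getHist; infer_instance
def pvWitness_getHist : List Int × Int := ([3, 1, 4, 1, 5, 9, 2, 6], 3)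
def Spec_getHist (data : List Int) (binsize : Int) (out : List Int) : Prop := out = getHist_alt data binsize
instance (data : List Int) (binsize : Int) (out : List Int) : Decidable (Spec_getHist data binsize out) := by unfold Spec_getHist; infer_instance

-- ===== CLAIM (what is proved, stated in full; the proofs are below) =====
def Claim_equal_getHist : Prop := ∀ (data : List Int) (binsize : Int), Dom_getHist data binsize → Pre_getHist data binsize → Spec_getHist data binsize (getHist data binsize)

-- ===== LEMMAS AND PROOFS =====

-- bridge recursion: one emitted value per full bin whose successor element exists
def binSums (b : Nat) (data : List Int) : List Int :=
  if h : b = 0 ∨ data.length ≤ b then []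
  else ((data.tail.take (b - 1)).sum) :: binSums b (data.drop b)
termination_by data.length
decreasing_by simp; omega

theorem getHistGo_append (b : Int) (xs ys : List Int) (ind : Int) (st : Int × List Int × Int) :
    getHistGo b (xs ++ ys) ind st = getHistGo b ys (ind + xs.length) (getHistGo b xs ind st) := by
  induction xs generalizing ind st with
  | nil => simp [getHistGo]
  | cons x xs ih =>
      obtain ⟨binnb, val, acc⟩ := st
      simp only [List.cons_append, getHistGo, List.length_cons]
      split_ifs <;> rw [ih] <;> push_cast <;> ring_nf

-- a stretch of the data containing no bin boundary only accumulates
theorem getHistGo_no_boundary (b : Int) (chunk : List Int) (ind : Int)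
    (st : Int × List Int × Int)
    (h : ∀ j : Nat, j < chunk.length → PySem.Int.mod (ind + j) b ≠ 0) :
    getHistGo b chunk ind st = (st.1, st.2.1, st.2.2 + chunk.sum) := by
  induction chunk generalizing ind st with
  | nil => simp [getHistGo]
  | cons i rest ih =>
      obtain ⟨binnb, val, acc⟩ := st
      have h0 : PySem.Int.mod (ind + (0 : Nat)) b ≠ 0 := h 0 (by simp)
      simp only [Nat.cast_zero, add_zero] at h0
      simp only [getHistGo, if_neg h0]
      rw [ih]
      · simp [add_assoc]
      · intro j hj
        have hjj := h (j + 1) (by simpa using Nat.succ_lt_succ hj)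
        push_cast at hjj
        have e : ind + 1 + (j : Int) = ind + ((j : Int) + 1) := by ring
        rw [e]
        exact hjj

-- after the first boundary the run restarts: the already-emitted list and the
-- pending accumulator factor out
theorem getHistGo_restart (b : Int) (hb : 1 ≤ b) (rest : List Int) :
    ∀ (q r B acc : Int) (V : List Int), 1 ≤ r → r ≤ b → 1 ≤ B →
    (getHistGo b rest (q * b + r) (B, V, acc)).2.1 =
      V ++ (getHistGo b rest r (1, [], acc)).2.1 := by
  induction rest with
  | nil => intro q r B acc V _ _ _; simp [getHistGo]
  | cons i rest ih =>
      intro q r B acc V hr1 hrb hB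
      by_cases hr : r = b
      · have hm1 : PySem.Int.mod (q * b + r) b = 0 := by
          rw [PySem.Int.mod_eq_emod_of_pos (by omega : (0:Int) < b)]
          have e : q * b + r = (q + 1) * b := by rw [hr]; ring
          simp [e, Int.mul_emod_left]
        have hm2 : PySem.Int.mod r b = 0 := by
          rw [PySem.Int.mod_eq_emod_of_pos (by omega : (0:Int) < b), hr]
          simp
        simp only [getHistGo, if_pos hm1, if_pos hm2, if_pos (by omega : B > 0),
          if_pos (by omega : (1 : Int) > 0)]
        have e1 : q * b + r + 1 = (q + 1) * b + 1 := by rw [hr]; ring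
        have e2 : r + 1 = 1 * b + 1 := by rw [hr]; ring
        rw [e1, e2, ih (q + 1) 1 (B + 1) 0 (V ++ [acc]) (by omega) hb (by omega),
          ih 1 1 (1 + 1) 0 ([] ++ [acc]) (by omega) hb (by omega)]
        simp
      · have hmr : ∀ q' : Int, PySem.Int.mod (q' * b + r) b = r := by
          intro q'
          rw [PySem.Int.mod_eq_emod_of_pos (by omega : (0:Int) < b)]
          have e : q' * b + r = r + b * q' := by ring
          rw [e, Int.add_mul_emod_self_left]
          exact Int.emod_eq_of_lt (by omega) (by omega)
        have hm1 : PySem.Int.mod (q * b + r) b ≠ 0 := by rw [hmr]; omega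
        have hm2 : PySem.Int.mod r b ≠ 0 := by
          have e := hmr 0; rw [zero_mul, zero_add] at e; rw [e]; omega
        simp only [getHistGo, if_neg hm1, if_neg hm2]
        have e1 : q * b + r + 1 = q * b + (r + 1) := by ring
        rw [e1, ih q (r + 1) B (acc + i) V (by omega) (by omega) hB]

-- A computes binSums
theorem getHist_eq_binSums (b : Int) (hb : 1 ≤ b) (data : List Int) :
    getHist data b = binSums b.toNat data := by
  have hm0 : PySem.Int.mod 0 b = 0 := by
    rw [PySem.Int.mod_eq_emod_of_pos (by omega : (0:Int) < b)]; simp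
  rcases data with _ | ⟨x, t⟩
  · simp [getHist, getHistGo, binSums]
  · have step0 : getHist (x :: t) b = (getHistGo b t 1 (1, [], 0)).2.1 := by
      simp [getHist, getHistGo, if_pos hm0]
    by_cases hsmall : ((t.length : Int) + 1) ≤ b
    · -- fewer elements than one full bin plus its successor: nothing is emitted
      rw [step0, getHistGo_no_boundary b t 1 (1, [], 0) ?_ ]
      · rw [binSums, dif_pos (Or.inr (by simp; omega))]
      · intro j hj
        rw [PySem.Int.mod_eq_emod_of_pos (by omega : (0:Int) < b),
          Int.emod_eq_of_lt (by omega) (by omega)]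
        omega
    · -- a full bin and its successor exist: peel one bin off both sides
      push_neg at hsmall
      set k : Nat := (b - 1).toNat with hk
      have hkt : k ≤ t.length := by omega
      have hdk : 0 < (t.drop k).length := by simp; omega
      obtain ⟨y, rest2, hyr⟩ : ∃ y rest2, t.drop k = y :: rest2 := by
        rcases h : t.drop k with _ | ⟨y, r2⟩
        · rw [h] at hdk; simp at hdk
        · exact ⟨y, r2, rfl⟩
      have hlr : rest2.length + 1 = t.length - k := by
        have := congrArg List.length hyr; simp at this; omega
      have hmb : PySem.Int.mod ((1 : Int) + k) b = 0 := by
        rw [PySem.Int.mod_eq_emod_of_pos (by omega : (0:Int) < b)]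
        have e : (1 : Int) + k = b := by omega
        simp [e]
      have hA : getHist (x :: t) b = (t.take k).sum :: (getHistGo b rest2 1 (1, [], 0)).2.1 := by
        rw [step0]
        conv_lhs => rw [show t = t.take k ++ t.drop k from (List.take_append_drop k t).symm]
        rw [getHistGo_append,
          getHistGo_no_boundary b (t.take k) 1 (1, [], 0) (by
            intro j hj
            rw [List.length_take] at hj
            rw [PySem.Int.mod_eq_emod_of_pos (by omega : (0:Int) < b),
              Int.emod_eq_of_lt (by omega) (by omega)]
            omega),
          hyr, List.length_take, Nat.min_eq_left hkt]
        simp only [getHistGo, if_pos hmb, if_pos (by norm_num : (1:Int) > 0)]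
        have e : (1 : Int) + ↑k + 1 = 1 * b + 1 := by omega
        rw [e, getHistGo_restart b hb rest2 1 1 (1 + 1) 0 ([] ++ [0 + (t.take k).sum])
          (by omega) hb (by omega)]
        simp
      have hrec := getHist_eq_binSums b hb (y :: rest2)
      rw [hA, binSums, dif_neg (by push_neg; exact ⟨by omega, by simp; omega⟩)]
      have hdrop : (x :: t).drop b.toNat = y :: rest2 := by
        have e : b.toNat = k + 1 := by omega
        rw [e, List.drop_succ_cons, hyr]
      have htail : (x :: t).tail.take (b.toNat - 1) = t.take k := by
        have e : b.toNat - 1 = k := by omega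
        rw [List.tail_cons, e]
      rw [hdrop, htail, ← hrec]
      have hy0 : getHist (y :: rest2) b = (getHistGo b rest2 1 (1, [], 0)).2.1 := by
        simp [getHist, getHistGo, if_pos hm0]
      rw [hy0]
termination_by data.length
decreasing_by
  simp only [List.length_cons]
  omega

-- number of emitted bins, as pyRange produces it
def binCnt (b : Int) (n : Nat) : Nat :=
  if 0 < (n : Int) - b then (((n : Int) - 1) / b).toNat else 0

theorem binCnt_eq (b : Int) (hb : 1 ≤ b) (n : Nat) (hn : 1 ≤ n) :
    binCnt b n = (((n : Int) - 1) / b).toNat := by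
  unfold binCnt
  split_ifs with h
  · rfl
  · rw [Int.ediv_eq_zero_of_lt (by omega) (by omega)]; rfl

theorem binCnt_succ (b : Int) (hb : 1 ≤ b) (n : Nat) (hn : b < (n : Int)) :
    binCnt b n = binCnt b (n - b.toNat) + 1 := by
  rw [binCnt_eq b hb n (by omega), binCnt_eq b hb (n - b.toNat) (by omega)]
  have e : (n : Int) - 1 = ((n - b.toNat : Nat) : Int) - 1 + 1 * b := by
    push_cast; omega
  rw [e, Int.add_mul_ediv_right _ _ (by omega : b ≠ 0)]
  have hq : 0 ≤ (((n - b.toNat : Nat) : Int) - 1) / b :=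
    Int.ediv_nonneg (by omega) (by omega)
  omega

-- the k-th emitted bin sum
theorem binSums_mapform (b : Int) (hb : 1 ≤ b) (data : List Int) :
    binSums b.toNat data = (List.range (binCnt b data.length)).map
      (fun k => ((data.drop (b.toNat * k + 1)).take (b.toNat - 1)).sum) := by
  by_cases hsmall : (data.length : Int) ≤ b
  · rw [binSums, dif_pos (Or.inr (by omega))]
    rw [show binCnt b data.length = 0 from by unfold binCnt; rw [if_neg (by omega)]]
    simp
  · push_neg at hsmall
    rw [binSums, dif_neg (by push_neg; exact ⟨by omega, by omega⟩)]
    have hrec := binSums_mapform b hb (data.drop b.toNat)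
    rw [List.length_drop] at hrec
    rw [hrec, binCnt_succ b hb data.length hsmall, List.range_succ_eq_map,
      List.map_cons, List.map_map]
    congr 1
    · simp [List.drop_one]
    · apply List.map_congr_left
      intro k _
      simp only [Function.comp_apply, Nat.succ_eq_add_one]
      rw [List.drop_drop]
      congr 2
      ring
termination_by data.length
decreasing_by simp; omega

-- B computes binSums
theorem getHist_alt_eq_binSums (b : Int) (hb : 1 ≤ b) (data : List Int) :
    getHist_alt data b = binSums b.toNat data := by
  rw [binSums_mapform b hb data]
  unfold getHist_alt
  rw [PySem.List.pyRange_of_pos 0 ((data.length : Int) - b) (by omega : (0:Int) < b)]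
  have ec : ((data.length : Int) - b - 0 + b - 1) = (data.length : Int) - 1 := by ring
  rw [ec, List.map_map,
    show (if (0:Int) < (data.length : Int) - b then (((data.length : Int) - 1) / b).toNat else 0)
      = binCnt b data.length from rfl]
  apply List.map_congr_left
  intro k _
  simp only [Function.comp_apply]
  have hB : ((b.toNat : Nat) : Int) = b := Int.toNat_of_nonneg (by omega)
  have ea : (0 + b * (k : Int) + 1) = ((b.toNat * k + 1 : Nat) : Int) := by
    push_cast [hB]; ring
  have eb2 : (0 + b * (k : Int) + b) = ((b.toNat * k + b.toNat : Nat) : Int) := by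
    push_cast [hB]; ring
  rw [ea, eb2, PySem.List.slice_natCast]
  have et : ∀ c : Nat, (c + b.toNat) - (c + 1) = b.toNat - 1 := fun c => by omega
  rw [et]

-- ===== VERDICT (by name: the statement is the Claim_ definition above) =====
theorem getHist_spec : Claim_equal_getHist := by
  intro data binsize _ hpre
  unfold Spec_getHist
  rw [getHist_eq_binSums binsize hpre, getHist_alt_eq_binSums binsize hpre]
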